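-- pv_equiv track=rewrite | github.com/eeg-ebe/SeqPHASE | seqphase1.py | stripStringEnd
-- ===== SOURCE A (Python) =====
-- def stripStringEnd(s):
--     end = len(s)
--     while True:
--         tmp = None
--         if (end > 0):
--             cCode = HxString.charCodeAt(s,(end - 1))
--             result = False
--             _g = 0
--             _g1 = [9, 10, 11, 12, 13, 32, 133, 160, 5760, 8192, 8192, 8193, 8194, 8195, 8196, 8197, 8198, 8199, 8200, 8201, 8202, 8232, 8233, 8239, 8287, 12288, 6158, 8203, 8204, 8205, 8288, 65279]
--             while (_g < len(_g1)):
--                 ele = (_g1[_g] if _g >= 0 and _g < len(_g1) else None)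
--                 _g = (_g + 1)
--                 if (ele == cCode):
--                     result = True
--                     break
--             tmp = result
--         else:
--             tmp = False
--         if (not tmp):
--             break
--         end = (end - 1)
--     return HxString.substring(s,0,end)
--
-- class HxString:
--     _hx_class_name = "HxString"
--     __slots__ = ()
--     _hx_statics = ["charCodeAt", "substring", "substr"]
--
--     @staticmethod
--     def charCodeAt(s,index):
--         if ((((s is None) or ((len(s) == 0))) or ((index < 0))) or ((index >= len(s)))):
--             return None
--         else:
--             return ord(s[index])
--
--     @staticmethod
--     def substring(s,startIndex,endIndex = None):
--         if (startIndex < 0):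
--             startIndex = 0
--         if (endIndex is None):
--             return s[startIndex:]
--         else:
--             if (endIndex < 0):
--                 endIndex = 0
--             if (endIndex < startIndex):
--                 return s[endIndex:startIndex]
--             else:
--                 return s[startIndex:endIndex]
--
--     @staticmethod
--     def substr(s,startIndex,_hx_len = None):
--         if (_hx_len is None):
--             return s[startIndex:]
--         else:
--             if (_hx_len == 0):
--                 return ""
--             if (startIndex < 0):
--                 startIndex = (len(s) + startIndex)
--                 if (startIndex < 0):
--                     startIndex = 0
--             return s[startIndex:(startIndex + _hx_len)]
-- ===== SOURCE B (Python) =====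
-- WS = frozenset([9, 10, 11, 12, 13, 32, 133, 160, 5760, 8192, 8193, 8194, 8195,
--                 8196, 8197, 8198, 8199, 8200, 8201, 8202, 8232, 8233, 8239,
--                 8287, 12288, 6158, 8203, 8204, 8205, 8288, 65279])
--
-- def stripStringEnd(s):
--     cut = 0
--     for i, ch in enumerate(s):
--         if ord(ch) not in WS:
--             cut = i + 1
--     return s[:cut]
-- ===== Notes on version B (the rewrite author's own statement) =====
-- stated objective: simpler
-- what changed: Replaces the backward while-loop that decrements an end cursor (with an inner linear scan over the hard-coded code-point list per character) by a single forward pass that tracks a high-water mark (the position just past the last non-whitespace character) using a frozenset membership test, and slices the string up to that mark.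
import Mathlib
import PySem

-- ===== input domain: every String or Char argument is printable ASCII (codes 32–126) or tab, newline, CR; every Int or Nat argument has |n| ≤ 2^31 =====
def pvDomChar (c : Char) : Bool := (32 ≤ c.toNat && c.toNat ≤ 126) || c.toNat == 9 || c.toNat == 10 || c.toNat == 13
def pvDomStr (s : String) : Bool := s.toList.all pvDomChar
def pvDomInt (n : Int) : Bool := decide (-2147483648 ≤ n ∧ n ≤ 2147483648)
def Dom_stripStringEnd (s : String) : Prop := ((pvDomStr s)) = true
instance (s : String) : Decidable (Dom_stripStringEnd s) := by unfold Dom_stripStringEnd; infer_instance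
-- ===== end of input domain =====

-- B strips the same hard-coded trailing code points with one forward pass over the string
-- keeping a high-water mark 'cut' instead of A's backward cursor with an inner list scan (objective: simpler).

-- ===== PORT A =====
-- the hard-coded code-point list _g1 of A (with its duplicated 8192)
def wsCodesA : List Int :=
  [9, 10, 11, 12, 13, 32, 133, 160, 5760, 8192, 8192, 8193, 8194, 8195, 8196, 8197,
   8198, 8199, 8200, 8201, 8202, 8232, 8233, 8239, 8287, 12288, 6158, 8203, 8204, 8205,
   8288, 65279]

-- HxString.charCodeAt
def hxCharCodeAt (l : List Char) (index : Int) : Option Int :=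
  if l.length = 0 ∨ index < 0 ∨ (l.length : Int) ≤ index then none
  else (PySem.List.pyGet? l index).map (fun c => (c.toNat : Int))

-- A's inner while loop over _g1 with the break (result accumulator collapses into the return)
def scanCodesA (cCode : Option Int) : List Int → Bool
  | [] => false
  | ele :: rest => if some ele = cCode then true else scanCodesA cCode rest

-- A's outer while loop: 'end' only decreases while positive, so it is a Nat counter
def stripLoopA (l : List Char) : Nat → Nat
  | 0 => 0          -- end = 0: tmp = False, break, return 0
  | e + 1 =>
      let tmp := scanCodesA (hxCharCodeAt l ((e + 1 : Nat) - 1 : Int)) wsCodesA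
      if tmp then stripLoopA l e else e + 1

-- HxString.substring (two-argument call; endIndex is never None here)
def hxSubstring (l : List Char) (startIndex endIndex : Int) : List Char :=
  let s1 := if startIndex < 0 then 0 else startIndex
  let e1 := if endIndex < 0 then 0 else endIndex
  if e1 < s1 then PySem.List.slice l (some e1) (some s1)
  else PySem.List.slice l (some s1) (some e1)

def stripStringEnd (s : String) : String :=
  String.mk (hxSubstring s.toList 0 (stripLoopA s.toList s.toList.length : Int))

-- ===== PORT B =====
-- the frozenset WS of B
def wsSetB : PySem.Set Int :=
  PySem.Set.ofList
    [9, 10, 11, 12, 13, 32, 133, 160, 5760, 8192, 8193, 8194, 8195, 8196, 8197, 8198,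
     8199, 8200, 8201, 8202, 8232, 8233, 8239, 8287, 12288, 6158, 8203, 8204, 8205,
     8288, 65279]

def stripStringEnd_alt (s : String) : String :=
  let cut : Int :=
    (PySem.List.enumerate s.toList 0).foldl
      (fun cut p => if (p.2.toNat : Int) ∈ wsSetB then cut else p.1 + 1) 0
  String.mk (PySem.List.slice s.toList none (some cut))

-- ===== PRECONDITION & SPEC =====
def Spec_stripStringEnd (s : String) (out : String) : Prop := out = stripStringEnd_alt s
instance (s : String) (out : String) : Decidable (Spec_stripStringEnd s out) := by unfold Spec_stripStringEnd; infer_instance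

-- ===== CLAIM (what is proved, stated in full; the proofs are below) =====
def Claim_equal_stripStringEnd : Prop := ∀ (s : String), Dom_stripStringEnd s → Spec_stripStringEnd s (stripStringEnd s)

-- ===== LEMMAS AND PROOFS =====

theorem scanCodesA_eq_contains (c : Int) (L : List Int) :
    scanCodesA (some c) L = L.contains c := by
  induction L with
  | nil => rfl
  | cons x xs ih =>
      simp only [scanCodesA, List.contains_cons]
      by_cases h : x = c
      · simp [h]
      · simp [h, ih, Ne.symm h]

theorem isWS_eq (c : Int) : scanCodesA (some c) wsCodesA = ((c ∈ wsSetB) : Bool) := by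
  rw [scanCodesA_eq_contains]
  simp only [wsCodesA, wsSetB, List.contains_eq_mem, PySem.Set.mem_ofList]
  simp [List.mem_cons]

def cutB (l : List Char) : Int :=
  (PySem.List.enumerate l 0).foldl
    (fun cut p => if (p.2.toNat : Int) ∈ wsSetB then cut else p.1 + 1) 0

theorem charCodeAt_append_last (l : List Char) (c : Char) :
    hxCharCodeAt (l ++ [c]) (l.length : Int) = some (c.toNat : Int) := by
  unfold hxCharCodeAt
  have h1 : ¬((l ++ [c]).length = 0 ∨ (l.length : Int) < 0 ∨
      ((l ++ [c]).length : Int) ≤ (l.length : Int)) := by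
    simp [List.length_append]
  rw [if_neg h1]
  rw [PySem.List.pyGet?_natCast]
  simp

theorem charCodeAt_append_lt (l : List Char) (c : Char) (i : Nat) (h : i < l.length) :
    hxCharCodeAt (l ++ [c]) (i : Int) = hxCharCodeAt l (i : Int) := by
  have h1 : ¬((l ++ [c]).length = 0 ∨ (i : Int) < 0 ∨ (((l ++ [c]).length : Int)) ≤ (i : Int)) := by
    simp; omega
  have h2 : ¬(l.length = 0 ∨ (i : Int) < 0 ∨ ((l.length : Int)) ≤ (i : Int)) := by
    omega
  unfold hxCharCodeAt
  rw [if_neg h1, if_neg h2, PySem.List.pyGet?_natCast, PySem.List.pyGet?_natCast,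
    List.getElem?_append_left h]

theorem stripLoopA_append (l : List Char) (c : Char) (e : Nat) (he : e ≤ l.length) :
    stripLoopA (l ++ [c]) e = stripLoopA l e := by
  induction e with
  | zero => rfl
  | succ n ih =>
      simp only [stripLoopA]
      have : ((n + 1 : Nat) - 1 : Int) = (n : Int) := by push_cast; omega
      rw [this, charCodeAt_append_lt l c n (by omega)]
      rw [ih (by omega)]

theorem cutB_append (l : List Char) (c : Char) :
    cutB (l ++ [c]) =
      if (c.toNat : Int) ∈ wsSetB then cutB l else (l.length : Int) + 1 := by
  unfold cutB
  rw [PySem.List.enumerate_append, List.foldl_append]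
  simp [PySem.List.enumerate]

theorem loop_eq_cut (l : List Char) : (stripLoopA l l.length : Int) = cutB l := by
  induction l using List.reverseRecOn with
  | nil => rfl
  | append_singleton l c ih =>
      rw [cutB_append]
      have hlen : (l ++ [c]).length = l.length + 1 := by simp
      rw [hlen]
      simp only [stripLoopA]
      have hc : ((l.length + 1 : Nat) - 1 : Int) = (l.length : Int) := by push_cast; omega
      rw [hc, charCodeAt_append_last, isWS_eq]
      by_cases hws : (c.toNat : Int) ∈ wsSetB
      · rw [if_pos hws, if_pos (by simp [hws])]
        rw [stripLoopA_append l c l.length le_rfl, ih]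
      · rw [if_neg hws, if_neg (by simp [hws])]
        push_cast; ring

theorem cutB_nonneg (l : List Char) : 0 ≤ cutB l := by
  have h := loop_eq_cut l
  omega

-- A's substring with startIndex 0 and a nonnegative endIndex is the take-slice
theorem hxSubstring_zero (l : List Char) (e : Int) (he : 0 ≤ e) :
    hxSubstring l 0 e = PySem.List.slice l none (some e) := by
  unfold hxSubstring
  rw [if_neg (by omega), if_neg (by omega), if_neg (by omega)]
  simp

-- ===== VERDICT (by name: the statement is the Claim_ definition above) =====
theorem stripStringEnd_spec : Claim_equal_stripStringEnd := by
  intro s _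
  unfold Spec_stripStringEnd stripStringEnd stripStringEnd_alt
  rw [loop_eq_cut]
  rw [hxSubstring_zero _ _ (cutB_nonneg s.toList)]
  rfl
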